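-- pv_equiv track=rewrite | github.com/Moremar/advent_of_code_2020 | day16/part1.py | solve
-- ===== SOURCE A (Python) =====
-- def valid(val, rule):
--     return rule[1] <= val <= rule[2] or rule[3] <= val <= rule[4]
--
-- def solve(data):
--     rules, _, tickets = data
--     error_rate = 0
--     for ticket in tickets:
--         for val in ticket:
--             if not any([valid(val, rule) for rule in rules]):
--                 error_rate += val
--     return error_rate
-- ===== SOURCE B (Python) =====
-- def solve(data):
--     rules, _, tickets = data
--     intervals = []
--     for rule in rules:
--         intervals.append((rule[1], rule[2]))
--         intervals.append((rule[3], rule[4]))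
--     intervals.sort(key=lambda iv: iv[0])
--     merged = []
--     for lo, hi in intervals:
--         if merged and lo <= merged[-1][1] + 1:
--             last_lo, last_hi = merged[-1]
--             merged[-1] = (last_lo, max(last_hi, hi))
--         else:
--             merged.append((lo, hi))
--     return sum(v for ticket in tickets for v in ticket
--                if not any(lo <= v <= hi for lo, hi in merged))
-- ===== Notes on version B (the rewrite author's own statement) =====
-- stated objective: faster
-- what changed: B collects the rules' four bounds into interval pairs once, sorts them by start and folds overlapping/adjacent intervals into a disjoint merged list, then sums the values not covered by that merged list, instead of A's per-value any() over a freshly built list of per-rule validity checks.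
import Mathlib
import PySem

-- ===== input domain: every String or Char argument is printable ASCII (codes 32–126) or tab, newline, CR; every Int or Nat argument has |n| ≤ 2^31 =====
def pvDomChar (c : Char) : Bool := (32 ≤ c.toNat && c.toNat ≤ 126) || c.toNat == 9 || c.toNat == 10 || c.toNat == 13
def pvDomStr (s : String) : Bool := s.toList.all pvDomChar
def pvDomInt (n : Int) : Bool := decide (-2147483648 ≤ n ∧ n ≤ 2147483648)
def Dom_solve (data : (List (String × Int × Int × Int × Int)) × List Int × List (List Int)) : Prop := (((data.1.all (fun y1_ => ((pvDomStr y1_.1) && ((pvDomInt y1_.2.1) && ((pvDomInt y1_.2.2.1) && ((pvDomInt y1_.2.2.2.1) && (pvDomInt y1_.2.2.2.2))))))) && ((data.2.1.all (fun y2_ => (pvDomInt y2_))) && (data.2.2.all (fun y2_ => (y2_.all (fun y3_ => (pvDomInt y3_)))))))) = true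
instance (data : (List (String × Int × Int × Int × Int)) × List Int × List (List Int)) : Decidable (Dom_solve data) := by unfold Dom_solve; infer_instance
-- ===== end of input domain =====

-- B replaces the per-value scan over all rules by a one-time sort-and-merge of the rule
-- intervals into a disjoint sorted list, then tests each value against that small list
-- (objective: faster, measured; return value only, no observable mutation).

-- ===== PORT A =====
def valid (val : Int) (rule : String × Int × Int × Int × Int) : Bool :=
  (decide (rule.2.1 ≤ val) && decide (val ≤ rule.2.2.1)) ||
  (decide (rule.2.2.2.1 ≤ val) && decide (val ≤ rule.2.2.2.2))

def solve (data : (List (String × Int × Int × Int × Int)) × List Int × List (List Int)) : Int :=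
  let rules := data.1
  let tickets := data.2.2
  tickets.foldl (fun error_rate ticket =>
    ticket.foldl (fun error_rate val =>
      if !((rules.map (fun rule => valid val rule)).any (fun b => b)) then
        error_rate + val
      else error_rate) error_rate) 0

-- ===== PORT B =====
-- 'if merged and lo <= merged[-1][1] + 1: merged[-1] = (…, max …) else: merged.append(…)'
def mergeStep (merged : List (Int × Int)) (iv : Int × Int) : List (Int × Int) :=
  match merged.getLast? with
  | some last =>
      if iv.1 ≤ last.2 + 1 then
        merged.dropLast ++ [(last.1, max last.2 iv.2)]
      else merged ++ [iv]
  | none => merged ++ [iv]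

def solve_alt (data : (List (String × Int × Int × Int × Int)) × List Int × List (List Int)) : Int :=
  let rules := data.1
  let tickets := data.2.2
  let intervals :=
    rules.foldl (fun acc rule =>
      acc ++ [(rule.2.1, rule.2.2.1)] ++ [(rule.2.2.2.1, rule.2.2.2.2)]) []
  let sortedIvs := PySem.List.sorted intervals (fun iv => iv.1) false
  let merged := sortedIvs.foldl mergeStep []
  ((tickets.flatMap (fun ticket =>
      ticket.filter (fun v => !(merged.any (fun iv => decide (iv.1 ≤ v) && decide (v ≤ iv.2))))))).sum

-- ===== PRECONDITION & SPEC =====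
def Spec_solve (data : (List (String × Int × Int × Int × Int)) × List Int × List (List Int)) (out : Int) : Prop := out = solve_alt data
instance (data : (List (String × Int × Int × Int × Int)) × List Int × List (List Int)) (out : Int) : Decidable (Spec_solve data out) := by unfold Spec_solve; infer_instance

-- ===== CLAIM (what is proved, stated in full; the proofs are below) =====
def Claim_equal_solve : Prop := ∀ (data : (List (String × Int × Int × Int × Int)) × List Int × List (List Int)), Dom_solve data → Spec_solve data (solve data)

-- ===== LEMMAS AND PROOFS =====

-- x lies in interval iv
def covIv (x : Int) (iv : Int × Int) : Bool := decide (iv.1 ≤ x) && decide (x ≤ iv.2)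

theorem covIv_merge (x : Int) (l iv : Int × Int) (hlo : l.1 ≤ iv.1) (hc : iv.1 ≤ l.2 + 1) :
    covIv x (l.1, max l.2 iv.2) = (covIv x l || covIv x iv) := by
  have h : (l.1 ≤ x ∧ x ≤ max l.2 iv.2) ↔ ((l.1 ≤ x ∧ x ≤ l.2) ∨ (iv.1 ≤ x ∧ x ≤ iv.2)) := by
    omega
  simp only [covIv]
  rw [Bool.eq_iff_iff]
  simp only [Bool.and_eq_true, Bool.or_eq_true, decide_eq_true_eq]
  exact h

theorem any_mergeStep (x : Int) (acc : List (Int × Int)) (iv : Int × Int)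
    (h : ∀ l, acc.getLast? = some l → l.1 ≤ iv.1) :
    (mergeStep acc iv).any (covIv x) = (acc.any (covIv x) || covIv x iv) := by
  unfold mergeStep
  cases hl : acc.getLast? with
  | none => simp [List.any_append]
  | some l =>
      obtain ⟨ys, rfl⟩ := List.getLast?_eq_some_iff.mp hl
      have hlo : l.1 ≤ iv.1 := h l hl
      by_cases hc : iv.1 ≤ l.2 + 1
      · simp only [hc, if_pos, List.dropLast_concat]
        simp [List.any_append, covIv_merge x l iv hlo hc, Bool.or_assoc]
      · simp [hc, List.any_append, Bool.or_assoc]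

/-- Folding `mergeStep` over a start-sorted interval list preserves per-point coverage. -/
theorem any_foldl_mergeStep (x : Int) :
    ∀ (s acc : List (Int × Int)),
    s.Pairwise (fun a b => a.1 ≤ b.1) →
    (∀ l, acc.getLast? = some l → ∀ iv ∈ s, l.1 ≤ iv.1) →
    (s.foldl mergeStep acc).any (covIv x) = (acc.any (covIv x) || s.any (covIv x))
  | [], acc, _, _ => by simp
  | iv :: rest, acc, hp, hinv => by
      have hp' := (List.pairwise_cons.mp hp).2
      have hhead := (List.pairwise_cons.mp hp).1
      have hstep := any_mergeStep x acc iv (fun l hl => hinv l hl iv (by simp))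
      have hinv' : ∀ l, (mergeStep acc iv).getLast? = some l → ∀ jv ∈ rest, l.1 ≤ jv.1 := by
        intro l hl jv hjv
        unfold mergeStep at hl
        cases hlast : acc.getLast? with
        | none =>
            simp only [hlast, List.getLast?_append, List.getLast?_singleton,
              Option.some_or, Option.some.injEq] at hl
            subst hl; exact hhead jv hjv
        | some last =>
            simp only [hlast] at hl
            by_cases hc : iv.1 ≤ last.2 + 1
            · simp only [hc, if_pos, List.getLast?_append, List.getLast?_singleton,
                Option.some_or, Option.some.injEq] at hl
              subst hl
              have h1 := hinv last hlast iv (by simp)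
              have h2 := hhead jv hjv
              simpa using le_trans h1 h2
            · simp only [hc, if_neg, not_false_iff, List.getLast?_append,
                List.getLast?_singleton, Option.some_or, Option.some.injEq] at hl
              subst hl; exact hhead jv hjv
      rw [List.foldl_cons, any_foldl_mergeStep x rest (mergeStep acc iv) hp' hinv',
        hstep]
      simp [Bool.or_assoc]

-- the interval list B builds, as a flatMap
theorem intervals_eq (rules : List (String × Int × Int × Int × Int)) :
    rules.foldl (fun acc rule =>
      acc ++ [(rule.2.1, rule.2.2.1)] ++ [(rule.2.2.2.1, rule.2.2.2.2)]) [] =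
    rules.flatMap (fun rule => [(rule.2.1, rule.2.2.1), (rule.2.2.2.1, rule.2.2.2.2)]) := by
  have h : ∀ (rs : List (String × Int × Int × Int × Int)) (acc : List (Int × Int)),
      rs.foldl (fun acc rule =>
        acc ++ [(rule.2.1, rule.2.2.1)] ++ [(rule.2.2.2.1, rule.2.2.2.2)]) acc =
      acc ++ rs.flatMap (fun rule => [(rule.2.1, rule.2.2.1), (rule.2.2.2.1, rule.2.2.2.2)]) := by
    intro rs
    induction rs with
    | nil => simp
    | cons r t ih => intro acc; rw [List.foldl_cons, ih]; simp
  simpa using h rules []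

/-- The merged list covers x iff some rule validates x. -/
theorem covered_iff (rules : List (String × Int × Int × Int × Int)) (x : Int) :
    ((PySem.List.sorted
        (rules.foldl (fun acc rule =>
          acc ++ [(rule.2.1, rule.2.2.1)] ++ [(rule.2.2.2.1, rule.2.2.2.2)]) [])
        (fun iv => iv.1) false).foldl mergeStep []).any (covIv x) =
    rules.any (fun rule => valid x rule) := by
  set ivs := rules.foldl (fun acc rule =>
    acc ++ [(rule.2.1, rule.2.2.1)] ++ [(rule.2.2.2.1, rule.2.2.2.2)]) [] with hivs
  have hsorted : (PySem.List.sorted ivs (fun iv => iv.1) false).Pairwise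
      (fun a b => a.1 ≤ b.1) := PySem.List.sorted_pairwise ivs (fun iv => iv.1)
  rw [any_foldl_mergeStep x _ [] hsorted (by simp)]
  have hperm : (PySem.List.sorted ivs (fun iv => iv.1) false).Perm ivs :=
    PySem.List.sorted_perm ivs (fun iv => iv.1) false
  simp only [List.any_nil, Bool.false_or]
  rw [hperm.any_eq, hivs, intervals_eq, List.any_flatMap]
  refine List.any_congr rfl ?_
  intro rule
  simp [valid, covIv]

-- A's nested accumulation as a filtered sum
theorem foldl_if_add_eq_sum (p : Int → Bool) :
    ∀ (l : List Int) (init : Int),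
    l.foldl (fun acc v => if !(p v) then acc + v else acc) init =
    init + (l.filter (fun v => !(p v))).sum
  | [], init => by simp
  | v :: t, init => by
      rw [List.foldl_cons, List.filter_cons]
      by_cases hv : p v = true
      · rw [if_neg (by simp [hv]), if_neg (by simp [hv]), foldl_if_add_eq_sum p t init]
      · rw [if_pos (by simp [hv]), if_pos (by simp [hv]),
          foldl_if_add_eq_sum p t (init + v), List.sum_cons]
        omega

theorem foldl_tickets_eq (p : Int → Bool) (tickets : List (List Int)) :
    ∀ init : Int,
    tickets.foldl (fun er t =>
      t.foldl (fun acc v => if !(p v) then acc + v else acc) er) init =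
    init + (tickets.flatMap (fun t => t.filter (fun v => !(p v)))).sum := by
  induction tickets with
  | nil => simp
  | cons t rest ih =>
      intro init
      rw [List.foldl_cons, ih, foldl_if_add_eq_sum p t init, List.flatMap_cons,
        List.sum_append]
      omega

-- ===== VERDICT (by name: the statement is the Claim_ definition above) =====
theorem solve_spec : Claim_equal_solve := by
  intro data _
  unfold Spec_solve solve solve_alt
  simp only []
  rw [foldl_tickets_eq (fun v => (data.1.map (fun rule => valid v rule)).any (fun b => b)) data.2.2 0]
  have hfun : (fun v => !((data.1.map (fun rule => valid v rule)).any (fun b => b)))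
      = (fun v => !(((PySem.List.sorted
          (data.1.foldl (fun acc rule =>
            acc ++ [(rule.2.1, rule.2.2.1)] ++ [(rule.2.2.2.1, rule.2.2.2.2)]) [])
          (fun iv => iv.1) false).foldl mergeStep []).any
            (fun iv => decide (iv.1 <= v) && decide (v <= iv.2)))) := by
    funext v
    rw [List.any_map]
    rw [show (fun iv : Int × Int => decide (iv.1 <= v) && decide (v <= iv.2)) = covIv v from rfl]
    rw [covered_iff data.1 v]
    rfl
  rw [hfun]
  simp
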